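-- pv_equiv track=rewrite | github.com/YradenRavid/wumpus | Agent/PathUtils.py | which_turn
-- ===== SOURCE A (Python) =====
-- def which_turn(curr_orientation,next_orientation):
--     if curr_orientation == next_orientation:
--         return "Forward"
--
--     possible_orientations = ["East","North","West","South"]
--     left_ind = possible_orientations.index(curr_orientation)
--     right_ind = left_ind
--     for i in range(len(possible_orientations)):
--         left_ind = (left_ind + 1) % len(possible_orientations)
--         left_orientation = possible_orientations[left_ind]
--         if left_orientation == next_orientation:
--             return "TrunLeft"
--         right_ind = (right_ind - 1) % len(possible_orientations)
--         right_orientation = possible_orientations[right_ind]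
--         if right_orientation == next_orientation:
--             return "TrunRight"
-- ===== SOURCE B (Python) =====
-- def which_turn(curr_orientation, next_orientation):
--     if curr_orientation == next_orientation:
--         return "Forward"
--     order = ["East", "North", "West", "South"]
--     i = order.index(curr_orientation)
--     left = order[(i + 1) % 4]
--     right = order[(i - 1) % 4]
--     opp = order[(i + 2) % 4]
--     if next_orientation == left or next_orientation == opp:
--         return "TrunLeft"
--     if next_orientation == right:
--         return "TrunRight"
--     return None
-- ===== Notes on version B (the rewrite author's own statement) =====
-- stated objective: simpler
-- what changed: Replaced A's 4-iteration alternating left/right ring walk by a direct computation of the three neighbor orientations from curr's index and a plain comparison chain.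
-- outside the precondition, e.g. on which_turn('East', 'Up'): A returns None, B returns None; on which_turn('Up', 'East'): A raises ValueError, B raises ValueError
import Mathlib
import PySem

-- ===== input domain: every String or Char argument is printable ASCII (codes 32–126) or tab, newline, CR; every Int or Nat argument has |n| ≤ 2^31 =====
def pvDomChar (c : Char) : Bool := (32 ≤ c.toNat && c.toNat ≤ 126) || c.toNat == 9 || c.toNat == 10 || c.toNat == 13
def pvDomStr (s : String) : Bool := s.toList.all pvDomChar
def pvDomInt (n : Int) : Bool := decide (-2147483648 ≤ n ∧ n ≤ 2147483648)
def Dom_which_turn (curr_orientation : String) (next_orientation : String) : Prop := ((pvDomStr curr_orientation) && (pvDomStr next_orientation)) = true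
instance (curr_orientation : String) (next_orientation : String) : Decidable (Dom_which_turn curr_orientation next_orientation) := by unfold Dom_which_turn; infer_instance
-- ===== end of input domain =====

-- B replaces A's 4-step alternating left/right ring walk with a direct computation of the
-- three neighbor orientations from curr's index; objective: simpler. Equivalence is about
-- the return value on Pre_ (where A returns a string).

-- ===== PORT A =====
-- the for-loop over range(4): state (left_ind, right_ind), fuel = remaining iterations;
-- "" stands for Python's None fall-through (outside Pre_)
def whichTurnLoop (po : List String) (n : String) : Nat → Int → Int → String
  | 0, _, _ => ""
  | k + 1, left_ind, right_ind =>
    let left_ind' := PySem.Int.mod (left_ind + 1) (po.length : Int)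
    let left_orientation := (PySem.List.pyGet? po left_ind').getD ""
    if left_orientation == n then "TrunLeft"
    else
      let right_ind' := PySem.Int.mod (right_ind - 1) (po.length : Int)
      let right_orientation := (PySem.List.pyGet? po right_ind').getD ""
      if right_orientation == n then "TrunRight"
      else whichTurnLoop po n k left_ind' right_ind'

def which_turn (curr_orientation : String) (next_orientation : String) : String :=
  if curr_orientation == next_orientation then "Forward"
  else
    let possible_orientations := ["East", "North", "West", "South"]
    match PySem.List.index? possible_orientations curr_orientation with
    | none => ""  -- ValueError (outside Pre_)
    | some left_ind =>
      whichTurnLoop possible_orientations next_orientation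
        possible_orientations.length left_ind left_ind

-- ===== PORT B =====
def which_turn_alt (curr_orientation : String) (next_orientation : String) : String :=
  if curr_orientation == next_orientation then "Forward"
  else
    let order := ["East", "North", "West", "South"]
    match PySem.List.index? order curr_orientation with
    | none => ""  -- ValueError (outside Pre_)
    | some i =>
      let left := (PySem.List.pyGet? order (PySem.Int.mod (i + 1) 4)).getD ""
      let right := (PySem.List.pyGet? order (PySem.Int.mod (i - 1) 4)).getD ""
      let opp := (PySem.List.pyGet? order (PySem.Int.mod (i + 2) 4)).getD ""
      if next_orientation == left || next_orientation == opp then "TrunLeft"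
      else if next_orientation == right then "TrunRight"
      else ""  -- None (outside Pre_)

-- ===== PRECONDITION & SPEC =====
-- Pre_ excludes inputs where curr ≠ next and either orientation is not one of the four
-- valid strings: there A raises ValueError (invalid curr) or returns None instead of a
-- str (invalid next); B behaves the same way there.
def Pre_which_turn (curr_orientation : String) (next_orientation : String) : Prop :=
  curr_orientation = next_orientation ∨
    (curr_orientation ∈ ["East", "North", "West", "South"] ∧
     next_orientation ∈ ["East", "North", "West", "South"])
instance (curr_orientation : String) (next_orientation : String) : Decidable (Pre_which_turn curr_orientation next_orientation) := by unfold Pre_which_turn; infer_instance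
def pvWitness_which_turn : String × String := ("East", "North")

def Spec_which_turn (curr_orientation : String) (next_orientation : String) (out : String) : Prop := out = which_turn_alt curr_orientation next_orientation
instance (curr_orientation : String) (next_orientation : String) (out : String) : Decidable (Spec_which_turn curr_orientation next_orientation out) := by unfold Spec_which_turn; infer_instance

-- ===== CLAIM (what is proved, stated in full; the proofs are below) =====
def Claim_equal_which_turn : Prop := ∀ (curr_orientation : String) (next_orientation : String), Dom_which_turn curr_orientation next_orientation → Pre_which_turn curr_orientation next_orientation → Spec_which_turn curr_orientation next_orientation (which_turn curr_orientation next_orientation)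

-- ===== LEMMAS AND PROOFS =====
theorem which_turn_eq_of_eq (c : String) :
    which_turn c c = which_turn_alt c c := by
  simp [which_turn, which_turn_alt]

-- ===== VERDICT (by name: the statement is the Claim_ definition above) =====
theorem which_turn_spec : Claim_equal_which_turn := by
  intro c n _ hpre
  show which_turn c n = which_turn_alt c n
  rcases hpre with rfl | ⟨hc, hn⟩
  · exact which_turn_eq_of_eq c
  · fin_cases hc <;> fin_cases hn <;> decide
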